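-- pv_equiv track=rewrite | github.com/VelocityFibre/VF | shared/consequence_analyzer.py | _calculate_overall_impact
-- ===== SOURCE A (Python) =====
-- from typing import Dict, Any, List, Set
--
-- def _calculate_overall_impact(categories: Dict[str, Dict[str, Any]]) -> str:
--     """Calculate overall impact level from category analysis.
--
--     Args:
--         categories: Dict of category analyses
--
--     Returns:
--         Overall impact level (none/low/medium/high/critical)
--     """
--     levels = [cat["level"] for cat in categories.values()]
--
--     # Priority order
--     if "critical" in levels:
--         return "critical"
--     elif "high" in levels:
--         return "high"
--     elif "medium" in levels:
--         return "medium"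
--     elif "low" in levels:
--         return "low"
--     else:
--         return "none"
-- ===== SOURCE B (Python) =====
-- def _calculate_overall_impact(categories):
--     """Rank-and-maximize over a priority ladder instead of a membership cascade."""
--     order = ["none", "low", "medium", "high", "critical"]
--     levels = [cat["level"] for cat in categories.values()]
--     best = max((order.index(lvl) for lvl in levels if lvl in order), default=0)
--     return order[best]
-- ===== Notes on version B (the rewrite author's own statement) =====
-- stated objective: idiomatic
-- what changed: Replaces the sequential if/elif membership cascade over the four level names with a single rank-and-maximize pass over a priority ladder list (max of order.index, default 0), indexing back into the ladder for the result.
import Mathlib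
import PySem

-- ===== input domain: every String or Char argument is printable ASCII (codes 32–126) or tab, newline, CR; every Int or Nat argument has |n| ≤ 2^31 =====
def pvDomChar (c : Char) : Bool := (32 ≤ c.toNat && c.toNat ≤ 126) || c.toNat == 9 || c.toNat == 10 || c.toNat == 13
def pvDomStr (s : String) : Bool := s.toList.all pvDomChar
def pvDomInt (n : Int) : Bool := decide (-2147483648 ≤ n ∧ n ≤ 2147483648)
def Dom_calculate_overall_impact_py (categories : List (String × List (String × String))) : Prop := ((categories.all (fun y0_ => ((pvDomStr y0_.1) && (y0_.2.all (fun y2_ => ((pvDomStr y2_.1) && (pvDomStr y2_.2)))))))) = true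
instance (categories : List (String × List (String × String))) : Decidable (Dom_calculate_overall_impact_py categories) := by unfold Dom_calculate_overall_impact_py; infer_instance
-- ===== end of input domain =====

-- B replaces A's if/elif membership cascade with a single rank-and-maximize pass over a priority ladder (idiomatic; same cost).


-- ===== PORT A =====
def calculate_overall_impact_py (categories : List (String × List (String × String))) : String :=
  -- levels = [cat["level"] for cat in categories.values()]  (cat["level"] total under Pre_, default "" unreachable there)
  let levels := (PySem.Dict.ofList categories).values.map
    (fun cat => (PySem.Dict.ofList cat).getD "level" "")
  if levels.contains "critical" then "critical"
  else if levels.contains "high" then "high"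
  else if levels.contains "medium" then "medium"
  else if levels.contains "low" then "low"
  else "none"

-- ===== PORT B =====
def calculate_overall_impact_py_alt (categories : List (String × List (String × String))) : String :=
  let order : List String := ["none", "low", "medium", "high", "critical"]
  let levels := (PySem.Dict.ofList categories).values.map
    (fun cat => (PySem.Dict.ofList cat).getD "level" "")
  -- best = max((order.index(lvl) for lvl in levels if lvl in order), default=0)
  let best := (levels.filter (fun lvl => order.contains lvl)).foldl
    (fun a lvl => max a ((PySem.List.index? order lvl).getD 0)) 0
  order.getD best "none"   -- best ≤ 4, so order[best] never raises

-- ===== PRECONDITION & SPEC =====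
-- Pre_ excludes exactly the inputs where cat["level"] raises KeyError in A (and in B): a kept category dict without key "level".
def Pre_calculate_overall_impact_py (categories : List (String × List (String × String))) : Prop :=
  ((PySem.Dict.ofList categories).values.all (fun cat => cat.any (fun p => p.1 == "level"))) = true
instance (categories : List (String × List (String × String))) : Decidable (Pre_calculate_overall_impact_py categories) := by unfold Pre_calculate_overall_impact_py; infer_instance
def pvWitness_calculate_overall_impact_py : (List (String × List (String × String))) :=
  [("network", [("level", "high")]), ("data", [("level", "none")])]

def Spec_calculate_overall_impact_py (categories : List (String × List (String × String))) (out : String) : Prop := out = calculate_overall_impact_py_alt categories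
instance (categories : List (String × List (String × String))) (out : String) : Decidable (Spec_calculate_overall_impact_py categories out) := by unfold Spec_calculate_overall_impact_py; infer_instance

-- ===== CLAIM (what is proved, stated in full; the proofs are below) =====
def Claim_equal_calculate_overall_impact_py : Prop := ∀ (categories : List (String × List (String × String))), Dom_calculate_overall_impact_py categories → Pre_calculate_overall_impact_py categories → Spec_calculate_overall_impact_py categories (calculate_overall_impact_py categories)

-- ===== LEMMAS AND PROOFS =====

def pvOrder : List String := ["none", "low", "medium", "high", "critical"]

def pvRank (l : String) : Nat :=
  if l = "critical" then 4 else if l = "high" then 3 else if l = "medium" then 2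
  else if l = "low" then 1 else 0

lemma pvRank_le (l : String) : pvRank l ≤ 4 := by
  unfold pvRank; split_ifs <;> omega

lemma pvIdx_eq_rank (l : String) (h : l ∈ pvOrder) :
    (PySem.List.index? pvOrder l).getD 0 = pvRank l := by
  simp only [pvOrder, List.mem_cons, List.not_mem_nil, or_false] at h
  rcases h with h | h | h | h | h <;> subst h <;> decide

lemma pvRank_eq_zero_of_not_mem (l : String) (h : l ∉ pvOrder) : pvRank l = 0 := by
  unfold pvRank
  split_ifs with h1 h2 h3 h4 <;> first
    | rfl
    | (subst_vars; exact absurd (by decide) h)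

lemma pv_filter_fold_eq (levels : List String) (a : Nat) :
    (levels.filter (fun lvl => pvOrder.contains lvl)).foldl
      (fun a lvl => max a ((PySem.List.index? pvOrder lvl).getD 0)) a
    = levels.foldl (fun a lvl => max a (pvRank lvl)) a := by
  induction levels generalizing a with
  | nil => rfl
  | cons l ls ih =>
    by_cases h : l ∈ pvOrder
    · have hc : pvOrder.contains l = true := by simpa using h
      simp only [List.filter_cons, hc, if_pos, List.foldl_cons]
      rw [pvIdx_eq_rank l h] at *
      exact ih _
    · have hc : pvOrder.contains l = false := by simpa using h
      simp only [List.filter_cons, hc, List.foldl_cons, pvRank_eq_zero_of_not_mem l h]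
      simpa using ih a

lemma pv_le_fold (levels : List String) (a : Nat) :
    a ≤ levels.foldl (fun a lvl => max a (pvRank lvl)) a := by
  induction levels generalizing a with
  | nil => exact le_refl a
  | cons l ls ih => exact le_trans (Nat.le_max_left _ _) (ih _)

lemma pv_fold_le (levels : List String) (a : Nat) (ha : a ≤ 4) :
    levels.foldl (fun a lvl => max a (pvRank lvl)) a ≤ 4 := by
  induction levels generalizing a with
  | nil => exact ha
  | cons l ls ih => exact ih _ (max_le ha (pvRank_le l))

lemma pv_rank_le_fold (levels : List String) (a : Nat) (l : String) (h : l ∈ levels) :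
    pvRank l ≤ levels.foldl (fun a lvl => max a (pvRank lvl)) a := by
  induction levels generalizing a with
  | nil => cases h
  | cons l' ls ih =>
    rcases List.mem_cons.mp h with h | h
    · subst h
      exact le_trans (Nat.le_max_right _ _) (pv_le_fold _ _)
    · exact ih _ h

lemma pv_fold_cases (levels : List String) (a : Nat) :
    levels.foldl (fun a lvl => max a (pvRank lvl)) a = a ∨
    ∃ l ∈ levels, pvRank l = levels.foldl (fun a lvl => max a (pvRank lvl)) a := by
  induction levels generalizing a with
  | nil => exact Or.inl rfl
  | cons l ls ih =>
    simp only [List.foldl_cons]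
    rcases ih (max a (pvRank l)) with h | ⟨l', hl', hr⟩
    · rcases Nat.le_total a (pvRank l) with hle | hle
      · exact Or.inr ⟨l, List.mem_cons_self, by rw [h]; omega⟩
      · exact Or.inl (by rw [h]; omega)
    · exact Or.inr ⟨l', List.mem_cons_of_mem _ hl', hr⟩

lemma pvRank_eq_4 (l : String) (h : pvRank l = 4) : l = "critical" := by
  unfold pvRank at h; split_ifs at h with h1 h2 h3 h4
  · exact h1
  all_goals omega
lemma pvRank_eq_3 (l : String) (h : pvRank l = 3) : l = "high" := by
  unfold pvRank at h; split_ifs at h with h1 h2 h3 h4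
  · omega
  · exact h2
  all_goals omega
lemma pvRank_eq_2 (l : String) (h : pvRank l = 2) : l = "medium" := by
  unfold pvRank at h; split_ifs at h with h1 h2 h3 h4
  · omega
  · omega
  · exact h3
  all_goals omega
lemma pvRank_eq_1 (l : String) (h : pvRank l = 1) : l = "low" := by
  unfold pvRank at h; split_ifs at h with h1 h2 h3 h4
  · omega
  · omega
  · omega
  · exact h4

lemma pv_main (levels : List String) :
    (if levels.contains "critical" then "critical"
     else if levels.contains "high" then "high"
     else if levels.contains "medium" then "medium"
     else if levels.contains "low" then "low"
     else "none")
    = pvOrder.getD (levels.foldl (fun a lvl => max a (pvRank lvl)) 0) "none" := by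
  set N := levels.foldl (fun a lvl => max a (pvRank lvl)) 0 with hN
  have hle : N ≤ 4 := pv_fold_le levels 0 (by omega)
  have hex : 0 < N → ∃ l ∈ levels, pvRank l = N := by
    intro hpos
    rcases pv_fold_cases levels 0 with h | h
    · omega
    · exact h
  by_cases hc : "critical" ∈ levels
  · have h4 : N = 4 := le_antisymm hle (pv_rank_le_fold levels 0 _ hc)
    simp [hc, h4, pvOrder]
  · have hN4 : N ≠ 4 := by
      intro h
      rcases hex (by omega) with ⟨l, hl, hr⟩
      exact hc (pvRank_eq_4 l (by omega) ▸ hl)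
    by_cases hh : "high" ∈ levels
    · have h3 : N = 3 := le_antisymm (by omega) (pv_rank_le_fold levels 0 _ hh)
      simp [hc, hh, h3, pvOrder]
    · have hN3 : N ≠ 3 := by
        intro h
        rcases hex (by omega) with ⟨l, hl, hr⟩
        exact hh (pvRank_eq_3 l (by omega) ▸ hl)
      by_cases hm : "medium" ∈ levels
      · have h2 : N = 2 := le_antisymm (by omega) (pv_rank_le_fold levels 0 _ hm)
        simp [hc, hh, hm, h2, pvOrder]
      · have hN2 : N ≠ 2 := by
          intro h
          rcases hex (by omega) with ⟨l, hl, hr⟩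
          exact hm (pvRank_eq_2 l (by omega) ▸ hl)
        by_cases hlo : "low" ∈ levels
        · have h1 : N = 1 := le_antisymm (by omega) (pv_rank_le_fold levels 0 _ hlo)
          simp [hc, hh, hm, hlo, h1, pvOrder]
        · have hN1 : N ≠ 1 := by
            intro h
            rcases hex (by omega) with ⟨l, hl, hr⟩
            exact hlo (pvRank_eq_1 l (by omega) ▸ hl)
          have h0 : N = 0 := by omega
          simp [hc, hh, hm, hlo, h0, pvOrder]

-- ===== VERDICT (by name: the statement is the Claim_ definition above) =====
theorem calculate_overall_impact_py_spec : Claim_equal_calculate_overall_impact_py := by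
  intro categories _ _
  unfold Spec_calculate_overall_impact_py
  show calculate_overall_impact_py categories =
    pvOrder.getD
      ((((PySem.Dict.ofList categories).values.map
          (fun cat => (PySem.Dict.ofList cat).getD "level" "")).filter
            (fun lvl => pvOrder.contains lvl)).foldl
        (fun a lvl => max a ((PySem.List.index? pvOrder lvl).getD 0)) 0) "none"
  rw [pv_filter_fold_eq]
  exact pv_main _
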